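-- pv_equiv track=rewrite | github.com/JaD1ng/zeroops | services/alerting-ml-python/app/api.py | _extract_anomaly_intervals
-- ===== SOURCE A (Python) =====
-- from typing import Dict, List, Optional
--
-- def _extract_anomaly_intervals(point_results: List[Dict]) -> List[Dict]:
--     n = len(point_results)
--     intervals: List[Dict] = []
--     i = 0
--     while i < n:
--         item = point_results[i]
--         if not bool(item.get("is_anomaly")):
--             i += 1
--             continue
--
--         start_idx = i
--         while i < n and bool(point_results[i].get("is_anomaly")):
--             i += 1
--         end_idx = i - 1
--
--         start_ts = str(point_results[start_idx].get("timestamp"))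
--         end_ts = str(point_results[end_idx].get("timestamp"))
--         intervals.append({"start": start_ts, "end": end_ts})
--
--     return intervals
-- ===== SOURCE B (Python) =====
-- from typing import Dict, List, Optional
--
-- def _extract_anomaly_intervals(point_results: List[Dict]) -> List[Dict]:
--     intervals: List[Dict] = []
--     run = None  # (start_item, last_anomalous_item) of the current open run
--     for item in point_results:
--         if bool(item.get("is_anomaly")):
--             run = (item, item) if run is None else (run[0], item)
--         elif run is not None:
--             intervals.append({"start": str(run[0].get("timestamp")),
--                               "end": str(run[1].get("timestamp"))})
--             run = None
--     if run is not None: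
--         intervals.append({"start": str(run[0].get("timestamp")),
--                           "end": str(run[1].get("timestamp"))})
--     return intervals
-- ===== Notes on version B (the rewrite author's own statement) =====
-- stated objective: simpler
-- what changed: Replaces A's index-based outer while with a run-consuming inner while by a single flat for-loop over the items that maintains the open run's (start, last) items and flushes on transition and at the end; no indices at all.
import Mathlib
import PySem

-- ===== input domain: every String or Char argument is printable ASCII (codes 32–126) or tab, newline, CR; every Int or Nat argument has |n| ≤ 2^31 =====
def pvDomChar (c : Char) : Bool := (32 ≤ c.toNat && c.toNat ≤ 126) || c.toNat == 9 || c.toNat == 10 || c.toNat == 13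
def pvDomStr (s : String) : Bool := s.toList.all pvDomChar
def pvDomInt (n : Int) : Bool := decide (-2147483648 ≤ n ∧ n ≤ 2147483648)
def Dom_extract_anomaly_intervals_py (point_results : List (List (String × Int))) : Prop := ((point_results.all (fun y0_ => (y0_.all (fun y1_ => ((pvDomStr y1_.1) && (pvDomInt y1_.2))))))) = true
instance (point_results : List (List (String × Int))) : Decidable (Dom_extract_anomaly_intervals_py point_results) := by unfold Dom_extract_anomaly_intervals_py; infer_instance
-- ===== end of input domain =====

-- B replaces A's index-based outer while + run-consuming inner while by one flat pass over the
-- items maintaining the open run's (start, last) items; same O(n) cost, simpler decomposition.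


-- shared Python-semantics helpers (used verbatim by both sources):
-- item.get(k) on the association-list encoding of a dict = first match
def pvGet (item : List (String × Int)) (k : String) : Option Int :=
  (item.find? (fun p => p.1 == k)).map (·.2)

-- bool(item.get("is_anomaly")): missing key → False, int value → (≠ 0)
def pvAnom (item : List (String × Int)) : Bool :=
  match pvGet item "is_anomaly" with
  | none => false
  | some v => v != 0

-- str(item.get("timestamp")): missing key → "None", int value → str(v)
def pvTs (item : List (String × Int)) : String :=
  match pvGet item "timestamp" with
  | none => "None"
  | some v => PySem.Int.toStr v

def pvInterval (s e : String) : List (String × String) := [("start", s), ("end", e)]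

-- ===== PORT A =====
-- inner while: 'while i < n and bool(point_results[i].get("is_anomaly")): i += 1'; returns final i
def pvAInner (pr : List (List (String × Int))) (n i : Nat) : Nat :=
  if i < n ∧ pvAnom (pr.getD i []) then pvAInner pr n (i + 1) else i
termination_by n - i
decreasing_by omega

theorem pvAInner_ge (pr : List (List (String × Int))) (n i : Nat) : i ≤ pvAInner pr n i := by
  fun_induction pvAInner with
  | case1 _ _ ih => omega
  | case2 => omega

-- outer while over the index i
def pvALoop (pr : List (List (String × Int))) (n i : Nat) : List (List (String × String)) :=
  if hlt : i < n then
    if ¬ pvAnom (pr.getD i []) then pvALoop pr n (i + 1)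
    else
      let start_idx := i
      let j := pvAInner pr n (i + 1)   -- condition at i already known true, loop continues from i+1
      let end_idx := j - 1
      pvInterval (pvTs (pr.getD start_idx [])) (pvTs (pr.getD end_idx [])) :: pvALoop pr n j
  else []
termination_by n - i
decreasing_by
  · omega
  · have := pvAInner_ge pr n (i + 1); omega

def extract_anomaly_intervals_py (point_results : List (List (String × Int))) :
    List (List (String × String)) :=
  pvALoop point_results point_results.length 0

-- ===== PORT B =====
-- one loop iteration: state = (intervals so far, open run as (start item, last anomalous item))
def pvBStep (st : List (List (String × String)) × Option (List (String × Int) × List (String × Int)))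
    (item : List (String × Int)) :
    List (List (String × String)) × Option (List (String × Int) × List (String × Int)) :=
  if pvAnom item then
    (st.1, some (match st.2 with | none => (item, item) | some (s, _) => (s, item)))
  else
    match st.2 with
    | some (s, p) => (st.1 ++ [pvInterval (pvTs s) (pvTs p)], none)
    | none => st

def extract_anomaly_intervals_py_alt (point_results : List (List (String × Int))) :
    List (List (String × String)) :=
  let st := point_results.foldl pvBStep ([], none)
  match st.2 with
  | some (s, p) => st.1 ++ [pvInterval (pvTs s) (pvTs p)]
  | none => st.1

-- ===== PRECONDITION & SPEC =====
def Spec_extract_anomaly_intervals_py (point_results : List (List (String × Int))) (out : List (List (String × String))) : Prop := out = extract_anomaly_intervals_py_alt point_results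
instance (point_results : List (List (String × Int))) (out : List (List (String × String))) : Decidable (Spec_extract_anomaly_intervals_py point_results out) := by unfold Spec_extract_anomaly_intervals_py; infer_instance

-- ===== CLAIM (what is proved, stated in full; the proofs are below) =====
def Claim_equal_extract_anomaly_intervals_py : Prop := ∀ (point_results : List (List (String × Int))), Dom_extract_anomaly_intervals_py point_results → Spec_extract_anomaly_intervals_py point_results (extract_anomaly_intervals_py point_results)

-- ===== LEMMAS AND PROOFS =====

theorem pvAInner_le (pr : List (List (String × Int))) (n i : Nat) (h : i ≤ n) :
    pvAInner pr n i ≤ n := by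
  fun_induction pvAInner with
  | case1 i h' ih => exact ih (by omega)
  | case2 => omega

-- common reference function: structural one-pass run grouping (cons-style)
def pvGrp : List (List (String × Int)) → Option (List (String × Int) × List (String × Int)) →
    List (List (String × String))
  | [], none => []
  | [], some (s, p) => [pvInterval (pvTs s) (pvTs p)]
  | x :: xs, r =>
    if pvAnom x then pvGrp xs (some (match r with | none => (x, x) | some (s, _) => (s, x)))
    else match r with
      | some (s, p) => pvInterval (pvTs s) (pvTs p) :: pvGrp xs none
      | none => pvGrp xs none

-- B equals pvGrp
theorem pvB_grp (xs : List (List (String × Int)))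
    (acc : List (List (String × String)))
    (r : Option (List (String × Int) × List (String × Int))) :
    (match (xs.foldl pvBStep (acc, r)).2 with
     | some (s, p) => (xs.foldl pvBStep (acc, r)).1 ++ [pvInterval (pvTs s) (pvTs p)]
     | none => (xs.foldl pvBStep (acc, r)).1) = acc ++ pvGrp xs r := by
  induction xs generalizing acc r with
  | nil =>
    cases r with
    | none => simp [pvGrp]
    | some sp => cases sp; simp [pvGrp]
  | cons x xs ih =>
    simp only [List.foldl_cons, pvGrp, pvBStep]
    by_cases hx : pvAnom x
    · simp only [hx, if_true]
      cases r with
      | none => exact ih acc _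
      | some sp => cases sp; exact ih acc _
    · simp only [hx, if_false, Bool.false_eq_true]
      cases r with
      | none => simpa using ih acc none
      | some sp =>
        cases sp
        rw [ih]
        simp

-- pvAInner characterised against drops is not needed; instead: invariant for an open run.
-- drop unfolding with getD
theorem drop_eq_getD_cons (pr : List (List (String × Int))) (i : Nat) (h : i < pr.length) :
    pr.drop i = pr.getD i [] :: pr.drop (i + 1) := by
  rw [List.getD_eq_getElem pr [] h, List.drop_eq_getElem_cons h]

-- open-run invariant: entering pvGrp with state (s, pr[i-1]) at position i matches A's
-- inner-while result pvAInner pr n i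
theorem pvGrp_run (pr : List (List (String × Int))) (i : Nat) (hle : i ≤ pr.length) (hpos : 0 < i)
    (s : List (String × Int)) :
    pvGrp (pr.drop i) (some (s, pr.getD (i - 1) [])) =
      pvInterval (pvTs s) (pvTs (pr.getD (pvAInner pr pr.length i - 1) [])) ::
        pvGrp (pr.drop (pvAInner pr pr.length i)) none := by
  generalize hfuel : pr.length - i = fuel
  induction fuel generalizing i with
  | zero =>
    have hi : i = pr.length := by omega
    subst hi
    rw [List.drop_length]
    rw [pvAInner]
    simp only [show ¬(pr.length < pr.length ∧ pvAnom (pr.getD pr.length [])) by simp, if_false]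
    rw [List.drop_length]
    rfl
  | succ fuel ih =>
    have hlt : i < pr.length := by omega
    rw [drop_eq_getD_cons pr i hlt]
    by_cases hx : pvAnom (pr.getD i [])
    · rw [pvGrp]
      simp only [hx, if_true]
      rw [pvAInner]
      simp only [hlt, hx, and_self, if_true]
      have := ih (i + 1) (by omega) (by omega) (by omega)
      simpa using this
    · rw [pvGrp]
      simp only [hx, if_false, Bool.false_eq_true]
      rw [pvAInner]
      simp only [hx, Bool.false_eq_true, and_false, if_false]
      rw [drop_eq_getD_cons pr i hlt, pvGrp]
      simp only [List.getD] at hx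
      simp [hx]

-- A's outer loop equals pvGrp from position i
theorem pvALoop_grp (pr : List (List (String × Int))) (i : Nat) (hle : i ≤ pr.length) :
    pvALoop pr pr.length i = pvGrp (pr.drop i) none := by
  generalize hfuel : pr.length - i = fuel
  induction fuel using Nat.strong_induction_on generalizing i with
  | _ fuel ih =>
  rw [pvALoop]
  by_cases hlt : i < pr.length
  · simp only [hlt, dif_pos]
    rw [drop_eq_getD_cons pr i hlt]
    by_cases hx : pvAnom (pr.getD i [])
    · simp only [hx, not_true, if_false]
      rw [pvGrp]
      simp only [hx, if_true]
      have hrun := pvGrp_run pr (i + 1) (by omega) (by omega) (pr.getD i [])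
      simp only [Nat.add_sub_cancel] at hrun
      rw [hrun]
      have hj1 := pvAInner_ge pr pr.length (i + 1)
      have hj2 := pvAInner_le pr pr.length (i + 1) (by omega)
      have : pvALoop pr pr.length (pvAInner pr pr.length (i + 1)) =
          pvGrp (pr.drop (pvAInner pr pr.length (i + 1))) none :=
        ih (pr.length - pvAInner pr pr.length (i + 1)) (by omega) _ hj2 rfl
      rw [this]
    · simp only [hx]
      rw [pvGrp]
      simp only [hx, if_false, Bool.false_eq_true]
      exact ih (pr.length - (i + 1)) (by omega) (i + 1) (by omega) rfl
  · simp only [hlt]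
    have hi : i = pr.length := by omega
    subst hi
    rw [List.drop_length]
    rfl

-- ===== VERDICT (by name: the statement is the Claim_ definition above) =====
theorem extract_anomaly_intervals_py_spec : Claim_equal_extract_anomaly_intervals_py := by
  intro pr _
  unfold Spec_extract_anomaly_intervals_py extract_anomaly_intervals_py
  unfold extract_anomaly_intervals_py_alt
  rw [pvALoop_grp pr 0 (by omega)]
  have := pvB_grp pr [] none
  simp only [List.nil_append] at this
  rw [List.drop_zero]
  exact this.symm
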